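-- pv_equiv track=rewrite | github.com/k8shiro/programming_contest_practice | Tools/0300_素数・素因数分解/segmented_sieve_prime_factors.py | segmented_factor_ordered
-- ===== SOURCE A (Python) =====
-- import math
--
-- def segmented_factor_ordered(L, R):
--     limit = int(math.isqrt(R)) + 1
--
--     # エラトステネスで √R 以下の素数を列挙
--     is_prime = [True] * (limit + 1)
--     is_prime[0] = is_prime[1] = False
--     primes = []
--     for i in range(2, limit + 1):
--         if is_prime[i]:
--             primes.append(i)
--             for j in range(i * i, limit + 1, i):
--                 is_prime[j] = False
--
--     size = R - L
--     numbers = [L + 1 + i for i in range(size)]  # 対象整数列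
--     factors = [[] for _ in range(size)]         # 素因数のリスト（重複あり）
--
--     for p in primes:
--         # 最初の p の倍数 >= L+1 を求める
--         start = max(p * p, ((L + 1 + p - 1) // p) * p)
--         for j in range(start, R + 1, p):
--             idx = j - (L + 1)
--             while numbers[idx] % p == 0:
--                 factors[idx].append(p)
--                 numbers[idx] //= p
--
--     for i in range(size):
--         if numbers[i] > 1:
--             factors[i].append(numbers[i])  # 残った素数も追加
--
--     # 出現順に変換（例：2,2,3 -> [(2,1),(2,2),(3,1)])
--     result = []
--     for i in range(size):
--         count = {}
--         ordered = []
--         for p in factors[i]: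
--             count[p] = count.get(p, 0) + 1
--             ordered.append((p, count[p]))
--         result.append((L + 1 + i, ordered))
--
--     return result
-- ===== SOURCE B (Python) =====
-- import math
--
--
-- def segmented_factor_ordered(L, R):
--     # Plain per-number trial division by every d in [2, isqrt(R)+1]:
--     # no sieve, no shared arrays; one pass over the numbers in (L, R].
--     limit = math.isqrt(R) + 1
--     result = []
--     for n in range(L + 1, R + 1):
--         ordered = []
--         m = n
--         if m > 1:
--             for d in range(2, limit + 1):
--                 c = 0
--                 while m % d == 0:
--                     c += 1
--                     m //= d
--                     ordered.append((d, c))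
--             if m > 1:
--                 ordered.append((m, 1))
--         result.append((n, ordered))
--     return result
-- ===== Notes on version B (the rewrite author's own statement) =====
-- stated objective: simpler
-- what changed: A sieves primes up to isqrt(R) and then, prime-outer, walks multiples of each prime through shared numbers/factors arrays before a dict-counting pass; B drops the sieve and the shared arrays entirely and, number-outer, trial-divides each n in (L,R] by every d in [2, isqrt(R)+1], emitting the (factor, running-exponent) pairs directly.
import Mathlib
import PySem

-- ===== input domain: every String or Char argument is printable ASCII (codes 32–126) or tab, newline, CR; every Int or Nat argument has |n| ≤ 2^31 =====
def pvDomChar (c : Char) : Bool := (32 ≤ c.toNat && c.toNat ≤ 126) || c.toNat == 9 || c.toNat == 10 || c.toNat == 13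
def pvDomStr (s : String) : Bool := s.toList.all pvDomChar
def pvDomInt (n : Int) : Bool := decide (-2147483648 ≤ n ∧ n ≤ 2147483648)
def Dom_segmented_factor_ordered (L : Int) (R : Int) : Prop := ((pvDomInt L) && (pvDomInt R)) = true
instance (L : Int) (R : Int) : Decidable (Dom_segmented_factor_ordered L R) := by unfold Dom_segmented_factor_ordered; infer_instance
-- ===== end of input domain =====

-- B drops A's sieve and shared numbers/factors arrays and trial-divides each n in (L,R]
-- by every d in [2, isqrt(R)+1] directly (objective: simpler; equal return values proved on Pre_).

-- ===== PORT A =====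
def pvMark (limit : Nat) (l : List Bool) (j i : Nat) : List Bool :=
  if j ≤ limit ∧ 1 ≤ i then pvMark limit (l.set j false) (j + i) i else l
termination_by limit + 1 - j
decreasing_by omega

def pvSieve (limit : Nat) : List Nat :=
  ((List.range' 2 (limit - 1)).foldl
    (fun st i => if st.1.getD i false then (pvMark limit st.1 (i * i) i, st.2 ++ [i]) else st)
    (((List.replicate (limit + 1) true).set 0 false).set 1 false, ([] : List Nat))).2

-- the while-loop 'while numbers[idx] % p == 0: factors[idx].append(p); numbers[idx] //= p';
-- the extra '0 < m ∧ 2 ≤ p' in the guard only makes the recursion total (it always holds where the loop runs)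
def pvWhileDiv (p : Int) (fs : List Int) (m : Int) : List Int × Int :=
  if h : PySem.Int.mod m p = 0 ∧ 0 < m ∧ 2 ≤ p then
    pvWhileDiv p (fs ++ [p]) (PySem.Int.floordiv m p)
  else (fs, m)
termination_by m.toNat
decreasing_by
  rcases h with ⟨h1, h2, h3⟩
  obtain ⟨k, hk⟩ := (PySem.Int.mod_eq_zero_iff_dvd _ _).mp h1
  rw [PySem.Int.floordiv_eq_ediv_of_pos (by omega), hk, Int.mul_ediv_cancel_left _ (by omega : p ≠ 0)]
  have hk0 : 0 < k := by nlinarith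
  have hkm : k < m := by nlinarith
  omega

def pvInner (L : Int) (p : Int) (st : List Int × List (List Int)) (j : Int) :
    List Int × List (List Int) :=
  let idx := (j - (L + 1)).toNat
  let r := pvWhileDiv p (st.2.getD idx []) (st.1.getD idx 0)
  (st.1.set idx r.2, st.2.set idx r.1)

def pvPair (fs : List Int) : List (Int × Int) :=
  (fs.foldl
    (fun (st : PySem.Dict Int Int × List (Int × Int)) p =>
      let c := st.1.getD p 0 + 1
      (st.1.insert p c, st.2 ++ [(p, c)]))
    (PySem.Dict.empty, [])).2

def segmented_factor_ordered (L : Int) (R : Int) : List (Int × (List (Int × Int))) :=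
  let limit : Nat := R.toNat.sqrt + 1
  let primes := pvSieve limit
  let size := (R - L).toNat
  let numbers := (List.range size).map (fun i : Nat => L + 1 + (i : Int))
  let factors := List.replicate size ([] : List Int)
  let st := primes.foldl
    (fun st (q : Nat) =>
      let p : Int := (q : Int)
      let start := max (p * p) (PySem.Int.floordiv (L + 1 + p - 1) p * p)
      (PySem.List.pyRange start (R + 1) p).foldl (pvInner L p) st)
    (numbers, factors)
  let factors2 := (List.range size).foldl
    (fun fs i => if 1 < st.1.getD i 0 then fs.set i ((fs.getD i []) ++ [st.1.getD i 0]) else fs)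
    st.2
  (List.range size).foldl
    (fun res (i : Nat) => res ++ [(L + 1 + (i : Int), pvPair (factors2.getD i []))]) []

-- ===== PORT B =====
-- 'c = 0' then 'while m % d == 0: c += 1; m //= d; ordered.append((d, c))';
-- again '0 < m ∧ 2 ≤ d' in the guard only makes the recursion total
def pvTrialWhile (d : Int) (c : Int) (m : Int) (ord : List (Int × Int)) :
    Int × List (Int × Int) :=
  if h : PySem.Int.mod m d = 0 ∧ 0 < m ∧ 2 ≤ d then
    pvTrialWhile d (c + 1) (PySem.Int.floordiv m d) (ord ++ [(d, c + 1)])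
  else (m, ord)
termination_by m.toNat
decreasing_by
  rcases h with ⟨h1, h2, h3⟩
  obtain ⟨k, hk⟩ := (PySem.Int.mod_eq_zero_iff_dvd _ _).mp h1
  rw [PySem.Int.floordiv_eq_ediv_of_pos (by omega), hk, Int.mul_ediv_cancel_left _ (by omega : d ≠ 0)]
  have hk0 : 0 < k := by nlinarith
  have hkm : k < m := by nlinarith
  omega

def segmented_factor_ordered_alt (L : Int) (R : Int) : List (Int × (List (Int × Int))) :=
  let limit : Nat := R.toNat.sqrt + 1
  (PySem.List.pyRange (L + 1) (R + 1) 1).foldl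
    (fun res n =>
      let ordered : List (Int × Int) :=
        if 1 < n then
          let s := (PySem.List.pyRange 2 ((limit : Int) + 1) 1).foldl
            (fun (s : Int × List (Int × Int)) d => pvTrialWhile d 0 s.1 s.2) (n, [])
          if 1 < s.1 then s.2 ++ [(s.1, 1)] else s.2
        else []
      res ++ [(n, ordered)]) []

-- ===== PRECONDITION & SPEC =====
-- Python A raises ValueError (math.isqrt of a negative) exactly when R < 0; it returns on every 0 ≤ R.
def Pre_segmented_factor_ordered (L : Int) (R : Int) : Prop := 0 ≤ R
instance (L : Int) (R : Int) : Decidable (Pre_segmented_factor_ordered L R) := by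
  unfold Pre_segmented_factor_ordered; infer_instance
def pvWitness_segmented_factor_ordered : Int × Int := (6, 30)

def Spec_segmented_factor_ordered (L : Int) (R : Int) (out : List (Int × (List (Int × Int)))) : Prop := out = segmented_factor_ordered_alt L R
instance (L : Int) (R : Int) (out : List (Int × (List (Int × Int)))) : Decidable (Spec_segmented_factor_ordered L R out) := by unfold Spec_segmented_factor_ordered; infer_instance

-- ===== CLAIM (what is proved, stated in full; the proofs are below) =====
def Claim_equal_segmented_factor_ordered : Prop := ∀ (L : Int) (R : Int), Dom_segmented_factor_ordered L R → Pre_segmented_factor_ordered L R → Spec_segmented_factor_ordered L R (segmented_factor_ordered L R)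

-- ===== LEMMAS AND PROOFS =====

-- proof-side abstractions
def pvStepA (n : Int) (st : List Int × Int) (q : Nat) : List Int × Int :=
  if (q : Int) ∣ n ∧ (q : Int) * (q : Int) ≤ n then pvWhileDiv (q : Int) st.1 st.2 else st

def pvStepB (st : Int × List (Int × Int)) (d : Int) : Int × List (Int × Int) :=
  pvTrialWhile d 0 st.1 st.2

def pvPairFrom (pre : List Int) : List Int → List (Int × Int)
  | [] => []
  | p :: t => (p, (pre.count p : Int) + 1) :: pvPairFrom (pre ++ [p]) t

def pvGoodP (c k : Nat) : Prop := 2 ≤ k ∧ ∀ p : Nat, p.Prime → p < c → p ∣ k → p = k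

-- pvWhileDiv basics
theorem pv_w_shift (p : Int) (fs : List Int) (m : Int) (a : List Int) :
    pvWhileDiv p (a ++ fs) m = (a ++ (pvWhileDiv p fs m).1, (pvWhileDiv p fs m).2) := by
  fun_induction pvWhileDiv p fs m generalizing a with
  | case1 fs m h ih =>
    rw [pvWhileDiv, dif_pos h, List.append_assoc, ih]
  | case2 fs m h => rw [pvWhileDiv, dif_neg h]

theorem pv_w_acc (p m : Int) (fs : List Int) :
    pvWhileDiv p fs m = (fs ++ (pvWhileDiv p [] m).1, (pvWhileDiv p [] m).2) := by
  have := pv_w_shift p [] m fs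
  simpa using this

theorem pv_w_nop (p m : Int) (fs : List Int) (h : ¬ p ∣ m) : pvWhileDiv p fs m = (fs, m) := by
  rw [pvWhileDiv, dif_neg]
  rintro ⟨h1, -, -⟩
  exact h ((PySem.Int.mod_eq_zero_iff_dvd _ _).mp h1)

theorem pv_w_all' (p : Int) (fs : List Int) (m : Int) :
    ∀ x ∈ (pvWhileDiv p fs m).1, x ∈ fs ∨ x = p := by
  fun_induction pvWhileDiv p fs m with
  | case1 fs m h ih =>
    intro x hx
    rcases ih x hx with hx' | hx'
    · rcases List.mem_append.mp hx' with h' | h'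
      · exact Or.inl h'
      · exact Or.inr (List.mem_singleton.mp h')
    · exact Or.inr hx'
  | case2 fs m h => intro x hx; exact Or.inl hx

theorem pv_w_all (p m : Int) : ∀ x ∈ (pvWhileDiv p [] m).1, x = p := by
  intro x hx
  rcases pv_w_all' p [] m x hx with h | h
  · simp at h
  · exact h

theorem pv_w_pos' (p : Int) (fs : List Int) (m : Int) (hm : 0 < m) :
    0 < (pvWhileDiv p fs m).2 := by
  fun_induction pvWhileDiv p fs m with
  | case1 fs m h ih =>
    rcases h with ⟨h1, h2, h3⟩
    obtain ⟨k, hk⟩ := (PySem.Int.mod_eq_zero_iff_dvd _ _).mp h1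
    apply ih
    rw [PySem.Int.floordiv_eq_ediv_of_pos (by omega), hk,
      Int.mul_ediv_cancel_left _ (by omega : p ≠ 0)]
    nlinarith
  | case2 fs m h => exact hm

theorem pv_w_pos (p m : Int) (hm : 0 < m) : 0 < (pvWhileDiv p [] m).2 :=
  pv_w_pos' p [] m hm

theorem pv_w_ndvd' (p : Int) (fs : List Int) (m : Int) (hm : 0 < m) (hp : 2 ≤ p) :
    ¬ p ∣ (pvWhileDiv p fs m).2 := by
  fun_induction pvWhileDiv p fs m with
  | case1 fs m h ih =>
    rcases h with ⟨h1, h2, h3⟩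
    obtain ⟨k, hk⟩ := (PySem.Int.mod_eq_zero_iff_dvd _ _).mp h1
    apply ih
    rw [PySem.Int.floordiv_eq_ediv_of_pos (by omega), hk,
      Int.mul_ediv_cancel_left _ (by omega : p ≠ 0)]
    nlinarith
  | case2 fs m h =>
    intro hdvd
    exact h ⟨(PySem.Int.mod_eq_zero_iff_dvd _ _).mpr hdvd, hm, hp⟩

theorem pv_w_ndvd (p m : Int) (hm : 0 < m) (hp : 2 ≤ p) : ¬ p ∣ (pvWhileDiv p [] m).2 :=
  pv_w_ndvd' p [] m hm hp

theorem pv_w_dvd' (p : Int) (fs : List Int) (m : Int) : (pvWhileDiv p fs m).2 ∣ m := by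
  fun_induction pvWhileDiv p fs m with
  | case1 fs m h ih =>
    rcases h with ⟨h1, h2, h3⟩
    obtain ⟨k, hk⟩ := (PySem.Int.mod_eq_zero_iff_dvd _ _).mp h1
    have hik : PySem.Int.floordiv m p = k := by
      rw [PySem.Int.floordiv_eq_ediv_of_pos (by omega), hk,
        Int.mul_ediv_cancel_left _ (by omega : p ≠ 0)]
    rw [hik] at ih ⊢
    exact dvd_trans ih ⟨p, by rw [hk]; ring⟩
  | case2 fs m h => exact dvd_refl m

theorem pv_w_dvd (p m : Int) (hm : 0 < m) (hp : 2 ≤ p) : (pvWhileDiv p [] m).2 ∣ m :=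
  pv_w_dvd' p [] m

theorem pv_w_self (p : Int) (hp : 2 ≤ p) : pvWhileDiv p [] p = ([p], 1) := by
  rw [pvWhileDiv, dif_pos ⟨(PySem.Int.mod_eq_zero_iff_dvd _ _).mpr dvd_rfl, by omega, hp⟩]
  have h1 : PySem.Int.floordiv p p = 1 := by
    rw [PySem.Int.floordiv_eq_ediv_of_pos (by omega), Int.ediv_self (by omega : p ≠ 0)]
  rw [h1, pvWhileDiv, dif_neg (by
    rintro ⟨h2, -, -⟩
    have hd : p ∣ 1 := (PySem.Int.mod_eq_zero_iff_dvd _ _).mp h2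
    have := Int.le_of_dvd (by omega) hd
    omega)]
  simp

-- pvTrialWhile expressed through pvWhileDiv
theorem pv_t_rel (d m : Int) (c : Int) (ord : List (Int × Int)) :
    pvTrialWhile d c m ord =
      ((pvWhileDiv d [] m).2,
        ord ++ (List.range (pvWhileDiv d [] m).1.length).map (fun t : Nat => (d, c + (t : Int) + 1))) := by
  fun_induction pvTrialWhile d c m ord with
  | case1 c m ord h ih =>
    rw [ih]
    have hw : pvWhileDiv d [] m = ([] ++ [d] ++ (pvWhileDiv d [] (PySem.Int.floordiv m d)).1,
        (pvWhileDiv d [] (PySem.Int.floordiv m d)).2) := by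
      rw [pvWhileDiv, dif_pos h, pv_w_acc]
    rw [hw]
    simp only [List.nil_append, List.singleton_append, List.length_cons, Prod.mk.injEq]
    refine ⟨trivial, ?_⟩
    rw [List.range_succ_eq_map, List.map_cons, List.map_map, List.append_assoc]
    congr 1
    rw [List.singleton_append]
    congr 1
    · simp
    · apply List.map_congr_left
      intro t _
      simp only [Function.comp_apply, Prod.mk.injEq]
      exact ⟨trivial, by push_cast; ring⟩
  | case2 c m ord h =>
    rw [pvWhileDiv, dif_neg h]
    simp

-- pairing lemmas
theorem pv_pairFrom_append (pre xs ys : List Int) :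
    pvPairFrom pre (xs ++ ys) = pvPairFrom pre xs ++ pvPairFrom (pre ++ xs) ys := by
  induction xs generalizing pre with
  | nil => simp [pvPairFrom]
  | cons x t ih =>
    simp only [List.cons_append, pvPairFrom, ih (pre ++ [x]), List.append_assoc,
      List.cons_append]
    simp

theorem pv_pairFrom_replicate' (k : Nat) (pre : List Int) (p : Int) :
    pvPairFrom pre (List.replicate k p) =
      (List.range k).map (fun t : Nat => (p, (pre.count p : Int) + (t : Int) + 1)) := by
  induction k generalizing pre with
  | zero => simp [pvPairFrom]
  | succ k ih =>
    rw [List.replicate_succ, List.range_succ_eq_map]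
    simp only [pvPairFrom, ih, List.map_cons, List.map_map]
    refine List.cons_eq_cons.mpr ⟨by simp, ?_⟩
    apply List.map_congr_left
    intro t _
    simp only [Function.comp_apply, Prod.mk.injEq, List.count_append, List.count_singleton]
    refine ⟨trivial, ?_⟩
    simp only [beq_self_eq_true, if_true]
    push_cast
    ring

theorem pv_pairFrom_replicate (pre : List Int) (k : Nat) (p : Int) (h : pre.count p = 0) :
    pvPairFrom pre (List.replicate k p) = (List.range k).map (fun t : Nat => (p, (t : Int) + 1)) := by
  rw [pv_pairFrom_replicate', h]
  simp

theorem pv_pvPair_eq' (fs pre : List Int) (acc : List (Int × Int)) :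
    (fs.foldl
      (fun (st : PySem.Dict Int Int × List (Int × Int)) p =>
        let c := st.1.getD p 0 + 1
        (st.1.insert p c, st.2 ++ [(p, c)]))
      (pre.foldl (fun d x => d.insert x (d.getD x 0 + 1)) PySem.Dict.empty, acc)).2 =
      acc ++ pvPairFrom pre fs := by
  induction fs generalizing pre acc with
  | nil => simp [pvPairFrom]
  | cons p t ih =>
    simp only [List.foldl_cons]
    have hc : (pre.foldl (fun d x => d.insert x (d.getD x 0 + 1)) PySem.Dict.empty).getD p 0
        = (pre.count p : Int) := by
      rw [PySem.Dict.getD_foldl_insert_add_one]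
      simp [PySem.Dict.getD_empty]
    have hd : (pre.foldl (fun d x => d.insert x (d.getD x 0 + 1)) PySem.Dict.empty).insert p
          ((pre.count p : Int) + 1)
        = (pre ++ [p]).foldl (fun d x => d.insert x (d.getD x 0 + 1)) PySem.Dict.empty := by
      rw [List.foldl_append, List.foldl_cons, List.foldl_nil,
        PySem.Dict.getD_foldl_insert_add_one, PySem.Dict.getD_empty]
      norm_num
    simp only [hc, hd, ih (pre ++ [p])]
    simp [pvPairFrom, List.append_assoc]

theorem pv_pvPair_eq (fs : List Int) : pvPair fs = pvPairFrom [] fs := by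
  have := pv_pvPair_eq' fs [] []
  simpa [pvPair] using this

-- sieve correctness
theorem pv_good_self (i : Nat) (h : 2 ≤ i) : pvGoodP i i ↔ i.Prime := by
  constructor
  · rintro ⟨-, hall⟩
    have h1 : i ≠ 1 := by omega
    have hp := Nat.minFac_prime h1
    have hd := Nat.minFac_dvd i
    have hle : i.minFac ≤ i := Nat.le_of_dvd (by omega) hd
    rcases lt_or_eq_of_le hle with hlt | heq
    · exact absurd (hall _ hp hlt hd) (Nat.ne_of_lt hlt)
    · rw [← heq]; exact hp
  · intro hp
    refine ⟨h, fun p pp hlt hdvd => ?_⟩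
    rcases (Nat.Prime.eq_one_or_self_of_dvd hp p hdvd) with h1 | h1
    · exact absurd h1 pp.ne_one
    · exact h1
theorem pv_mark_length (limit : Nat) (l : List Bool) (j i : Nat) :
    (pvMark limit l j i).length = l.length := by
  fun_induction pvMark limit l j i with
  | case1 l j h ih => rw [ih]; simp
  | case2 l j h => rfl
theorem pv_mark_getD (limit : Nat) (l : List Bool) (j i k : Nat)
    (hl : l.length = limit + 1) (hk : k ≤ limit) (hi : 1 ≤ i) :
    (pvMark limit l j i).getD k false =
      if j ≤ k ∧ i ∣ (k - j) then false else l.getD k false := by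
  fun_induction pvMark limit l j i with
  | case1 l j h ih =>
    rw [ih (by simp [hl])]
    by_cases hkj : k = j
    · subst hkj
      have : ¬ (k + i ≤ k ∧ i ∣ (k - (k + i))) := by omega
      rw [if_neg this, if_pos ⟨le_refl k, by simp⟩]
      rw [List.getD_eq_getElem?_getD, List.getElem?_set_self (by omega)]
      rfl
    · have hset : (l.set j false).getD k false = l.getD k false := by
        rw [List.getD_eq_getElem?_getD, List.getElem?_set_ne (by omega), ← List.getD_eq_getElem?_getD]
      rw [hset]
      congr 1
      · -- (j + i ≤ k ∧ i ∣ k - (j + i)) ↔ (j ≤ k ∧ i ∣ k - j), given k ≠ j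
        apply propext
        constructor
        · rintro ⟨h1, h2⟩
          refine ⟨by omega, ?_⟩
          have : k - j = (k - (j + i)) + i := by omega
          rw [this]
          exact Nat.dvd_add h2 dvd_rfl
        · rintro ⟨h1, h2⟩
          have hlt : j < k := by omega
          have h1' : 1 ≤ k - j := by omega
          have hge : i ≤ k - j := Nat.le_of_dvd (by omega) h2
          refine ⟨by omega, ?_⟩
          have : k - (j + i) = (k - j) - i := by omega
          rw [this]
          exact Nat.dvd_sub h2 dvd_rfl
  | case2 l j h =>
    have : ¬ (j ≤ k ∧ i ∣ (k - j)) := by omega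
    rw [if_neg this]
theorem pv_sieve_inv (limit c : Nat) (hc : 2 + c ≤ limit + 1) :
    let st := (List.range' 2 c).foldl
      (fun st i => if st.1.getD i false then (pvMark limit st.1 (i * i) i, st.2 ++ [i]) else st)
      (((List.replicate (limit + 1) true).set 0 false).set 1 false, ([] : List Nat))
    st.1.length = limit + 1 ∧
    (∀ k, k ≤ limit → (st.1.getD k false = true ↔ pvGoodP (2 + c) k)) ∧
    st.2 = (List.range' 2 c).filter (fun i => decide i.Prime) := by
  induction c with
  | zero =>
    simp only [List.range'_zero, List.foldl_nil]
    refine ⟨by simp, ?_, by simp⟩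
    intro k hk
    by_cases hk0 : k = 0
    · subst hk0
      rw [List.getD_eq_getElem?_getD, List.getElem?_set_ne (by omega),
        List.getElem?_set_self (by simp)]
      simp [pvGoodP]
    by_cases hk1 : k = 1
    · subst hk1
      rw [List.getD_eq_getElem?_getD, List.getElem?_set_self (by simp; omega)]
      simp only [Option.getD_some, Bool.false_eq_true, false_iff]
      rintro ⟨h2, -⟩
      omega
    · have h2 : 2 ≤ k := by omega
      rw [List.getD_eq_getElem?_getD]
      rw [List.getElem?_set_ne (by omega), List.getElem?_set_ne (by omega)]
      rw [List.getElem?_replicate, if_pos (by omega)]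
      simp only [Option.getD_some]
      constructor
      · intro _
        exact ⟨h2, fun p pp hlt _ => absurd pp.two_le (by omega)⟩
      · intro _; trivial
  | succ c ih =>
    obtain ⟨ihlen, ihinv, ihps⟩ := ih (by omega)
    rw [List.range'_1_concat, List.foldl_append, List.foldl_cons, List.foldl_nil]
    set i := 2 + c with hi
    set st := (List.range' 2 c).foldl
      (fun st i => if st.1.getD i false = true then (pvMark limit st.1 (i * i) i, st.2 ++ [i]) else st)
      (((List.replicate (limit + 1) true).set 0 false).set 1 false, ([] : List Nat)) with hst
    have hil : i ≤ limit := by omega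
    have h2i : 2 ≤ i := by omega
    have entry_i : (st.1.getD i false = true) ↔ i.Prime := by
      rw [ihinv i hil]
      exact pv_good_self i h2i
    have h2ci : 2 + (c + 1) = i + 1 := by omega
    by_cases hpr : (st.1.getD i false = true)
    · have hprime : i.Prime := entry_i.mp hpr
      simp only [if_pos hpr]
      refine ⟨by rw [pv_mark_length]; exact ihlen, ?_, ?_⟩
      · intro k hk
        rw [h2ci, pv_mark_getD limit st.1 (i * i) i k ihlen hk (by omega)]
        have hdvd_iff : (i * i ≤ k ∧ i ∣ (k - i * i)) ↔ (i ∣ k ∧ i * i ≤ k) := by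
          constructor
          · rintro ⟨h1, h2⟩
            refine ⟨?_, h1⟩
            have hk' : k = (k - i * i) + i * i := by omega
            rw [hk']
            exact Nat.dvd_add h2 (Dvd.intro i rfl)
          · rintro ⟨h1, h2⟩
            exact ⟨h2, Nat.dvd_sub h1 (Dvd.intro i rfl)⟩
        by_cases hm : i * i ≤ k ∧ i ∣ (k - i * i)
        · rw [if_pos hm]
          obtain ⟨hdk, hik2⟩ := hdvd_iff.mp hm
          simp only [Bool.false_eq_true, false_iff]
          rintro ⟨hk2, hall⟩
          have heq := hall i hprime (by omega) hdk
          have h2ii : 2 * i ≤ i * i := Nat.mul_le_mul h2i (le_refl i)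
          omega
        · rw [if_neg hm, ihinv k hk]
          have hnm : ¬ (i ∣ k ∧ i * i ≤ k) := fun hcon => hm (hdvd_iff.mpr hcon)
          constructor
          · rintro ⟨hk2, hall⟩
            refine ⟨hk2, fun p pp plt pdvd => ?_⟩
            by_cases hpi : p = i
            · subst hpi
              have hki2 : k < i * i := by
                by_contra hge
                push_neg at hge
                exact hnm ⟨pdvd, hge⟩
              obtain ⟨t, ht⟩ := pdvd
              have ht0 : 0 < t := by
                rcases Nat.eq_zero_or_pos t with h0 | h0
                · subst h0; omega
                · exact h0
              have hit : i * t < i * i := ht ▸ hki2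
              have htl : t < i := Nat.lt_of_mul_lt_mul_left hit
              rcases Nat.lt_or_ge t 2 with h1 | h1
              · have ht1 : t = 1 := by omega
                subst ht1
                omega
              · have hq := Nat.minFac_prime (by omega : t ≠ 1)
                have hqt : t.minFac ∣ t := Nat.minFac_dvd t
                have hqk : t.minFac ∣ k := ht ▸ dvd_mul_of_dvd_right hqt i
                have hqle : t.minFac ≤ t := Nat.le_of_dvd ht0 hqt
                have hqk' := hall t.minFac hq (by omega) hqk
                have h2t : 2 * t ≤ i * t := Nat.mul_le_mul h2i (le_refl t)
                omega
            · exact hall p pp (by omega) pdvd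
          · rintro ⟨hk2, hall⟩
            exact ⟨hk2, fun p pp plt pdvd => hall p pp (by omega) pdvd⟩
      · rw [List.filter_append, ihps]
        simp [hprime]
    · simp only [if_neg hpr]
      have hnp : ¬ i.Prime := fun h => hpr (entry_i.mpr h)
      refine ⟨ihlen, ?_, ?_⟩
      · intro k hk
        rw [h2ci, ihinv k hk]
        constructor
        · rintro ⟨hk2, hall⟩
          refine ⟨hk2, fun p pp plt pdvd => ?_⟩
          by_cases hpi : p = i
          · subst hpi; exact absurd pp hnp
          · exact hall p pp (by omega) pdvd
        · rintro ⟨hk2, hall⟩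
          exact ⟨hk2, fun p pp plt pdvd => hall p pp (by omega) pdvd⟩
      · rw [List.filter_append, ihps]
        simp [hnp]
theorem pv_sieve_eq (limit : Nat) :
    pvSieve limit = (List.range' 2 (limit - 1)).filter (fun i => decide i.Prime) := by
  have h1 : 1 ≤ limit ∨ limit = 0 := by omega
  rcases h1 with h1 | h0
  · exact (pv_sieve_inv limit (limit - 1) (by omega)).2.2
  · subst h0
    simp [pvSieve]
-- inert tails and helper list lemmas
theorem pv_getD_set_ne {α : Type} (l : List α) (n i : Nat) (a d : α) (h : n ≠ i) :
    (l.set n a).getD i d = l.getD i d := by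
  simp [List.getD_eq_getElem?_getD, List.getElem?_set_ne h]

theorem pv_getD_set_self {α : Type} (l : List α) (n : Nat) (a d : α) (h : n < l.length) :
    (l.set n a).getD n d = a := by
  simp [List.getD_eq_getElem?_getD, List.getElem?_set_self h]

theorem pv_inertA (n : Int) (ps : List Nat) (st : List Int × Int)
    (h : ∀ q ∈ ps, ¬ ((q : Int) ∣ st.2)) : ps.foldl (pvStepA n) st = st := by
  induction ps with
  | nil => rfl
  | cons q t ih =>
    have hq : ¬ ((q : Int) ∣ st.2) := h q (List.mem_cons_self ..)
    have hstep : pvStepA n st q = st := by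
      unfold pvStepA
      split_ifs with hc
      · rw [pv_w_nop _ _ _ hq]
      · rfl
    rw [List.foldl_cons, hstep]
    exact ih (fun q' hq' => h q' (List.mem_cons_of_mem _ hq'))

theorem pv_inertB (ds : List Int) (m : Int) (ord : List (Int × Int))
    (h : ∀ d ∈ ds, ¬ d ∣ m) : ds.foldl pvStepB (m, ord) = (m, ord) := by
  induction ds with
  | nil => rfl
  | cons d t ih =>
    have hd : ¬ d ∣ m := h d (List.mem_cons_self ..)
    have hstep : pvStepB (m, ord) d = (m, ord) := by
      unfold pvStepB
      rw [pvTrialWhile, dif_neg]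
      rintro ⟨h1, -, -⟩
      exact hd ((PySem.Int.mod_eq_zero_iff_dvd _ _).mp h1)
    rw [List.foldl_cons, hstep]
    exact ih (fun d' hd' => h d' (List.mem_cons_of_mem _ hd'))

theorem pv_exists_prime_factor (m : Int) (h : 1 < m) : ∃ q : Nat, q.Prime ∧ (q : Int) ∣ m := by
  have h2 : 2 ≤ m.toNat := by omega
  refine ⟨m.toNat.minFac, Nat.minFac_prime (by omega), ?_⟩
  have hd : (m.toNat.minFac : Int) ∣ (m.toNat : Int) := Int.natCast_dvd_natCast.mpr (Nat.minFac_dvd _)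
  rwa [Int.toNat_of_nonneg (by omega)] at hd

theorem pv_smallA (n : Int) (hn : n ≤ 1) (ps : List Nat) (fs : List Int) :
    ps.foldl (pvStepA n) (fs, n) = (fs, n) := by
  induction ps with
  | nil => rfl
  | cons q t ih =>
    have hstep : pvStepA n (fs, n) q = (fs, n) := by
      unfold pvStepA
      split_ifs with hc
      · rw [pvWhileDiv, dif_neg]
        rintro ⟨-, h0, h2⟩
        have : (4 : Int) ≤ (q : Int) * (q : Int) := by
          have : (2 : Int) ≤ (q : Int) := h2
          nlinarith
        omega
      · rfl
    rw [List.foldl_cons, hstep, ih]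

theorem pv_nodup_pyRange_pos (a b s : Int) (hs : 0 < s) : (PySem.List.pyRange a b s).Nodup := by
  rw [PySem.List.pyRange_of_pos a b hs]
  apply List.Nodup.map
  · intro x y hxy
    have hx : s * (x : Int) = s * (y : Int) := by linarith
    have := mul_left_cancel₀ (by omega : s ≠ 0) hx
    exact_mod_cast this
  · exact List.nodup_range

theorem pv_mem_range_iff (L R p n : Int) (hp : 2 ≤ p) (hn1 : L + 1 ≤ n) (hnR : n ≤ R) :
    n ∈ PySem.List.pyRange (max (p * p) (PySem.Int.floordiv (L + 1 + p - 1) p * p)) (R + 1) p ↔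
      (p ∣ n ∧ p * p ≤ n) := by
  have hp0 : (0 : Int) < p := by omega
  set q := PySem.Int.floordiv (L + 1 + p - 1) p with hq
  have hds : p ∣ max (p * p) (q * p) := by
    rcases le_total (p * p) (q * p) with hle | hle
    · rw [max_eq_right hle]; exact dvd_mul_left p q
    · rw [max_eq_left hle]; exact dvd_mul_right p p
  rw [PySem.List.mem_pyRange_iff_of_pos hp0]
  constructor
  · rintro ⟨hs, -, hd⟩
    have hdn : p ∣ n := by
      have : n = (n - max (p * p) (q * p)) + max (p * p) (q * p) := by ring
      rw [this]
      exact dvd_add hd hds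
    exact ⟨hdn, le_trans (le_max_left _ _) hs⟩
  · rintro ⟨hdn, hpp⟩
    obtain ⟨s, hsn⟩ := hdn
    have hqs : q ≤ s := by
      by_contra hlt
      push_neg at hlt
      have hs1 : s + 1 ≤ PySem.Int.floordiv (L + 1 + p - 1) p := by rw [← hq]; omega
      have h2 : (s + 1) * p ≤ L + 1 + p - 1 :=
        (PySem.Int.le_floordiv_iff_mul_le hp0).mp hs1
      have hsn' : n = s * p := by rw [hsn]; ring
      nlinarith
    have hqn : q * p ≤ n := by
      calc q * p ≤ s * p := by nlinarith
      _ = n := by rw [hsn]; ring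
    refine ⟨max_le hpp hqn, by omega, ?_⟩
    exact dvd_sub ⟨s, hsn⟩ hds

theorem pv_leftover_len (sz : Nat) (ns : List Int) (fs0 : List (List Int)) :
    ((List.range sz).foldl
      (fun fs i => if 1 < ns.getD i 0 then fs.set i ((fs.getD i []) ++ [ns.getD i 0]) else fs)
      fs0).length = fs0.length := by
  induction sz generalizing fs0 with
  | zero => rfl
  | succ sz ih =>
    rw [List.range_succ, List.foldl_append, List.foldl_cons, List.foldl_nil]
    split_ifs with hc
    · rw [List.length_set, ih]
    · rw [ih]

theorem pv_leftover_untouched (sz : Nat) (ns : List Int) (fs0 : List (List Int)) (i : Nat)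
    (h : sz ≤ i) :
    ((List.range sz).foldl
      (fun fs i => if 1 < ns.getD i 0 then fs.set i ((fs.getD i []) ++ [ns.getD i 0]) else fs)
      fs0).getD i [] = fs0.getD i [] := by
  revert h
  induction sz generalizing fs0 with
  | zero => intro h; rfl
  | succ sz ih =>
    intro h
    rw [List.range_succ, List.foldl_append, List.foldl_cons, List.foldl_nil]
    by_cases hc : 1 < ns.getD sz 0
    · rw [if_pos hc, pv_getD_set_ne _ _ _ _ _ (by omega), ih _ (by omega)]
    · rw [if_neg hc, ih _ (by omega)]

theorem pv_leftoverLoop (sz : Nat) (ns : List Int) (fs0 : List (List Int)) (i : Nat)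
    (hi : i < sz) (hif : i < fs0.length) :
    ((List.range sz).foldl
      (fun fs i => if 1 < ns.getD i 0 then fs.set i ((fs.getD i []) ++ [ns.getD i 0]) else fs)
      fs0).getD i [] =
      if 1 < ns.getD i 0 then fs0.getD i [] ++ [ns.getD i 0] else fs0.getD i [] := by
  revert hi
  induction sz generalizing fs0 with
  | zero => intro hi; omega
  | succ sz ih =>
    intro hi
    rw [List.range_succ, List.foldl_append, List.foldl_cons, List.foldl_nil]
    by_cases hisz : i = sz
    · subst hisz
      have hu := pv_leftover_untouched i ns fs0 i (le_refl i)
      have hlen := pv_leftover_len i ns fs0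
      by_cases hc : 1 < ns.getD i 0
      · simp only [if_pos hc]
        rw [pv_getD_set_self _ _ _ _ (by omega), hu]
      · simp only [if_neg hc]
        exact hu
    · have hisz' : i < sz := by omega
      by_cases hc : 1 < ns.getD sz 0
      · rw [if_pos hc, pv_getD_set_ne _ _ _ _ _ (by omega), ih _ hif hisz']
      · rw [if_neg hc, ih _ hif hisz']

-- the per-number heart: A's prime-indexed conditional stripping followed by the leftover append
-- produces, after pairing, exactly B's trial division transcript
theorem pv_core (n : Int) (hn : 1 < n) :
    ∀ (k lo : Nat) (m : Int) (fs : List Int) (ord : List (Int × Int)),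
      2 ≤ lo → 0 < m → m ∣ n → m ≤ n →
      (∀ q : Nat, q.Prime → (q : Int) ∣ m → lo ≤ q) →
      (∀ x ∈ fs, ∃ q : Nat, x = (q : Int) ∧ q < lo) →
      ord = pvPairFrom [] fs →
      ((((List.range' lo k).map (fun d : Nat => (d : Int))).foldl pvStepB (m, ord)).2 ++
        (if 1 < (((List.range' lo k).map (fun d : Nat => (d : Int))).foldl pvStepB (m, ord)).1 then
          [((((List.range' lo k).map (fun d : Nat => (d : Int))).foldl pvStepB (m, ord)).1, 1)] else []) =
      pvPairFrom [] ((((List.range' lo k).filter (fun i => decide i.Prime)).foldl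
          (pvStepA n) (fs, m)).1 ++
        (if 1 < (((List.range' lo k).filter (fun i => decide i.Prime)).foldl
            (pvStepA n) (fs, m)).2 then
          [(((List.range' lo k).filter (fun i => decide i.Prime)).foldl (pvStepA n) (fs, m)).2]
         else []))) := by
  intro k
  induction k with
  | zero =>
    intro lo m fs ord h2 hm hmn hmle hfac hfs hord
    simp only [List.range'_zero, List.map_nil, List.filter_nil, List.foldl_nil]
    by_cases hm1 : 1 < m
    · rw [if_pos hm1, if_pos hm1]
      have hnotin : m ∉ fs := by
        obtain ⟨q, hq, hqd⟩ := pv_exists_prime_factor m hm1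
        have hql : lo ≤ q := hfac q hq hqd
        have hqm : (q : Int) ≤ m := Int.le_of_dvd hm hqd
        intro hmem
        obtain ⟨q', hq', hq'lt⟩ := hfs m hmem
        have : ((q' : Nat) : Int) < ((lo : Nat) : Int) := by exact_mod_cast hq'lt
        have : ((lo : Nat) : Int) ≤ (q : Int) := by exact_mod_cast hql
        omega
      have hcount : fs.count m = 0 := List.count_eq_zero.mpr hnotin
      have := pv_pairFrom_append [] fs [m]
      simp only [List.nil_append] at this
      rw [hord, this]
      simp [pvPairFrom, hcount]
    · rw [if_neg hm1, if_neg hm1]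
      simp [hord]
  | succ k ih =>
    intro lo m fs ord h2 hm hmn hmle hfac hfs hord
    rw [List.range'_succ, List.map_cons, List.foldl_cons]
    have hlo0 : (0 : Int) < (lo : Int) := by exact_mod_cast Nat.lt_of_lt_of_le (by omega) h2
    have hlo2 : (2 : Int) ≤ (lo : Int) := by exact_mod_cast h2
    by_cases hdvd : (lo : Int) ∣ m
    · -- lo divides m; lo must be prime
      have hprime : lo.Prime := by
        by_contra hnp
        have hlo1 : lo ≠ 1 := by omega
        have hqp := Nat.minFac_prime hlo1
        have hqd : lo.minFac ∣ lo := Nat.minFac_dvd lo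
        have hqlt : lo.minFac < lo := by
          rcases lt_or_eq_of_le (Nat.le_of_dvd (by omega) hqd) with h | h
          · exact h
          · exact absurd (h ▸ hqp) hnp
        have hqdm : ((lo.minFac : Nat) : Int) ∣ m :=
          dvd_trans (Int.natCast_dvd_natCast.mpr hqd) hdvd
        have := hfac lo.minFac hqp hqdm
        omega
      rw [List.filter_cons_of_pos (by simpa using hprime), List.foldl_cons]
      have hdn : (lo : Int) ∣ n := dvd_trans hdvd hmn
      have hcountlo : fs.count ((lo : Nat) : Int) = 0 := by
        apply List.count_eq_zero.mpr
        intro hmem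
        obtain ⟨q', hq', hq'lt⟩ := hfs _ hmem
        have : ((q' : Nat) : Int) = ((lo : Nat) : Int) := hq'.symm
        have : q' = lo := by exact_mod_cast this
        omega
      by_cases hbig : (lo : Int) * (lo : Int) ≤ n
      · -- both sides strip lo fully
        set W := pvWhileDiv (lo : Int) [] m with hW
        have hA : pvStepA n (fs, m) lo = (fs ++ W.1, W.2) := by
          unfold pvStepA
          rw [if_pos ⟨hdn, hbig⟩]
          exact pv_w_acc _ _ _
        have hrep : W.1 = List.replicate W.1.length ((lo : Nat) : Int) :=
          List.eq_replicate_of_mem (pv_w_all _ _)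
        have hB : pvStepB (m, ord) (lo : Int) =
            (W.2, ord ++ (List.range W.1.length).map
              (fun t : Nat => (((lo : Nat) : Int), (0 : Int) + (t : Int) + 1))) := by
          show pvTrialWhile (lo : Int) 0 m ord = _
          rw [pv_t_rel]
        have hm' : 0 < W.2 := pv_w_pos _ _ hm
        have hdvd' : W.2 ∣ m := pv_w_dvd _ _ hm hlo2
        have hord' : ord ++ (List.range W.1.length).map
            (fun t : Nat => (((lo : Nat) : Int), (0 : Int) + (t : Int) + 1)) =
            pvPairFrom [] (fs ++ W.1) := by
          have happ := pv_pairFrom_append [] fs W.1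
          simp only [List.nil_append] at happ
          rw [happ, ← hord]
          congr 1
          rw [hrep, pv_pairFrom_replicate fs W.1.length _ hcountlo, ← hrep]
          apply List.map_congr_left
          intro t _
          simp only [Prod.mk.injEq]
          exact ⟨trivial, by ring⟩
        rw [hA, hB, hord']
        exact ih (lo + 1) W.2 (fs ++ W.1) (pvPairFrom [] (fs ++ W.1)) (by omega) hm'
          (dvd_trans hdvd' hmn) (le_trans (Int.le_of_dvd hm hdvd') hmle)
          (fun q hq hqd => by
            have hql : lo ≤ q := hfac q hq (dvd_trans hqd hdvd')
            rcases lt_or_eq_of_le hql with h | h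
            · omega
            · exfalso
              apply pv_w_ndvd (lo : Int) m hm hlo2
              rw [← hW]
              rw [← h] at hqd
              exact hqd)
          (fun x hx => by
            rcases List.mem_append.mp hx with h | h
            · obtain ⟨q', hq', hlt⟩ := hfs x h
              exact ⟨q', hq', by omega⟩
            · have := pv_w_all _ _ x h
              exact ⟨lo, this, by omega⟩)
          rfl
      · -- n < lo²: here m = lo, A leaves it for the leftover pass, B strips it now
        have hmlo : m = (lo : Int) := by
          obtain ⟨t, ht⟩ := hdvd
          have ht0 : 0 < t := by nlinarith
          have htlo : t < (lo : Int) := by nlinarith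
          rcases lt_or_ge t 2 with h1 | h1
          · have ht1 : t = 1 := by omega
            rw [ht, ht1, mul_one]
          · exfalso
            obtain ⟨q, hqp, hqd⟩ := pv_exists_prime_factor t (by omega)
            have hqm : (q : Int) ∣ m := by
              rw [ht]
              exact Dvd.dvd.mul_left hqd (lo : Int)
            have hql : lo ≤ q := hfac q hqp hqm
            have : (q : Int) ≤ t := Int.le_of_dvd (by omega) hqd
            have : ((lo : Nat) : Int) ≤ (q : Int) := by exact_mod_cast hql
            omega
        have hA : pvStepA n (fs, m) lo = (fs, m) := by
          unfold pvStepA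
          rw [if_neg (fun hc => hbig hc.2)]
        have hB : pvStepB (m, ord) (lo : Int) = (1, ord ++ [(((lo : Nat) : Int), 1)]) := by
          show pvTrialWhile (lo : Int) 0 m ord = _
          rw [pv_t_rel, hmlo, pv_w_self _ hlo2]
          norm_num
        have hinertA : ((List.range' (lo + 1) k).filter (fun i => decide i.Prime)).foldl
            (pvStepA n) (fs, m) = (fs, m) := by
          apply pv_inertA
          intro q hq hqd
          have hq' : q ∈ List.range' (lo + 1) k := (List.mem_filter.mp hq).1
          have hqge : lo + 1 ≤ q := (List.mem_range'_1.mp hq').1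
          have : (q : Int) ≤ m := Int.le_of_dvd hm hqd
          have : ((lo : Nat) : Int) + 1 ≤ (q : Int) := by exact_mod_cast hqge
          omega
        have hinertB : ((List.range' (lo + 1) k).map (fun d : Nat => (d : Int))).foldl pvStepB
            (1, ord ++ [(((lo : Nat) : Int), 1)]) = (1, ord ++ [(((lo : Nat) : Int), 1)]) := by
          apply pv_inertB
          intro d hd hdd
          obtain ⟨q, hq, rfl⟩ := List.mem_map.mp hd
          have hqge : lo + 1 ≤ q := (List.mem_range'_1.mp hq).1
          have : (q : Int) ≤ 1 := Int.le_of_dvd (by omega) hdd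
          have : ((lo : Nat) : Int) + 1 ≤ (q : Int) := by exact_mod_cast hqge
          omega
        rw [hA, hB, hinertB, hinertA]
        simp only [if_neg (by omega : ¬ (1 : Int) < 1), List.append_nil]
        rw [if_pos (by omega : (1 : Int) < m)]
        have happ := pv_pairFrom_append [] fs [m]
        simp only [List.nil_append] at happ
        rw [happ, ← hord]
        have hcm : fs.count m = 0 := by rw [hmlo]; exact hcountlo
        simp [pvPairFrom, hmlo, hcountlo]
    · -- lo does not divide m: both sides are inert at lo
      have hB : pvStepB (m, ord) (lo : Int) = (m, ord) := by
        show pvTrialWhile (lo : Int) 0 m ord = _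
        rw [pvTrialWhile, dif_neg]
        rintro ⟨h1, -, -⟩
        exact hdvd ((PySem.Int.mod_eq_zero_iff_dvd _ _).mp h1)
      have hfac' : ∀ q : Nat, q.Prime → (q : Int) ∣ m → lo + 1 ≤ q := by
        intro q hq hqd
        have hql : lo ≤ q := hfac q hq hqd
        rcases lt_or_eq_of_le hql with h | h
        · omega
        · exfalso; rw [← h] at hqd; exact hdvd hqd
      have htail := ih (lo + 1) m fs ord (by omega) hm hmn hmle hfac'
        (fun x hx => by
          obtain ⟨q', hq', hlt⟩ := hfs x hx
          exact ⟨q', hq', by omega⟩)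
        hord
      rw [hB]
      by_cases hpr : lo.Prime
      · rw [List.filter_cons_of_pos (by simpa using hpr), List.foldl_cons]
        have hA : pvStepA n (fs, m) lo = (fs, m) := by
          unfold pvStepA
          split_ifs with hc
          · exact pv_w_nop _ _ _ hdvd
          · rfl
        rw [hA]
        exact htail
      · rw [List.filter_cons_of_neg (by simpa using hpr)]
        exact htail

-- A's range chooses exactly the multiples of p in [max(p², first multiple ≥ L+1), R]
-- the inner j-loop, pointwise at index i
theorem pv_innerLoop (L : Int) (p : Int) (js : List Int)
    (hmem : ∀ j ∈ js, L + 1 ≤ j) (hnd : js.Nodup)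
    (st : List Int × List (List Int)) (i : Nat) (hi1 : i < st.1.length)
    (hi2 : i < st.2.length) :
    (js.foldl (pvInner L p) st).1.length = st.1.length ∧
    (js.foldl (pvInner L p) st).2.length = st.2.length ∧
    ((js.foldl (pvInner L p) st).1.getD i 0, (js.foldl (pvInner L p) st).2.getD i []) =
      (if (L + 1 + (i : Int)) ∈ js then
        ((pvWhileDiv p (st.2.getD i []) (st.1.getD i 0)).2,
         (pvWhileDiv p (st.2.getD i []) (st.1.getD i 0)).1)
      else (st.1.getD i 0, st.2.getD i [])) := by
  induction js generalizing st with
  | nil => simp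
  | cons j t ih =>
    have hjL : L + 1 ≤ j := hmem j (List.mem_cons_self ..)
    obtain ⟨hjt, hnd'⟩ := List.nodup_cons.mp hnd
    have hlen1 : (pvInner L p st j).1.length = st.1.length := by
      simp [pvInner, List.length_set]
    have hlen2 : (pvInner L p st j).2.length = st.2.length := by
      simp [pvInner, List.length_set]
    have ihans := ih (fun j' hj' => hmem j' (List.mem_cons_of_mem _ hj')) hnd'
      (pvInner L p st j) (by rw [hlen1]; exact hi1) (by rw [hlen2]; exact hi2)
    rw [List.foldl_cons]
    refine ⟨by rw [ihans.1, hlen1], by rw [ihans.2.1, hlen2], ?_⟩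
    by_cases hji : j = L + 1 + (i : Int)
    · have hidx : (j - (L + 1)).toNat = i := by omega
      have hmemt : (L + 1 + (i : Int)) ∉ t := by rw [← hji]; exact hjt
      rw [ihans.2.2, if_neg hmemt, if_pos (by rw [← hji]; exact List.mem_cons_self ..)]
      show ((pvInner L p st j).1.getD i 0, (pvInner L p st j).2.getD i []) = _
      simp only [pvInner, hidx]
      rw [pv_getD_set_self _ _ _ _ hi1, pv_getD_set_self _ _ _ _ hi2]
    · have hidx : (j - (L + 1)).toNat ≠ i := by omega
      have hun1 : (pvInner L p st j).1.getD i 0 = st.1.getD i 0 := by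
        simp only [pvInner]
        rw [pv_getD_set_ne _ _ _ _ _ hidx]
      have hun2 : (pvInner L p st j).2.getD i [] = st.2.getD i [] := by
        simp only [pvInner]
        rw [pv_getD_set_ne _ _ _ _ _ hidx]
      rw [ihans.2.2, hun1, hun2]
      have hmiff : ((L + 1 + (i : Int)) ∈ j :: t) ↔ ((L + 1 + (i : Int)) ∈ t) := by
        constructor
        · intro hmm
          rcases List.mem_cons.mp hmm with he | he
          · exact absurd he.symm hji
          · exact he
        · exact fun hmm => List.mem_cons_of_mem _ hmm
      by_cases hm : (L + 1 + (i : Int)) ∈ t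
      · rw [if_pos hm, if_pos (hmiff.mpr hm)]
      · rw [if_neg hm, if_neg (fun hmm => hm (hmiff.mp hmm))]

-- the whole prime loop, pointwise at index i
def pvF (L R : Int) (st : List Int × List (List Int)) (q : Nat) : List Int × List (List Int) :=
  let p : Int := (q : Int)
  let start := max (p * p) (PySem.Int.floordiv (L + 1 + p - 1) p * p)
  (PySem.List.pyRange start (R + 1) p).foldl (pvInner L p) st

theorem pv_primeLoop (L R : Int) (ps : List Nat) (hps : ∀ q ∈ ps, 2 ≤ q)
    (st : List Int × List (List Int)) (i : Nat) (hi1 : i < st.1.length)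
    (hi2 : i < st.2.length) (hiR : L + 1 + (i : Int) ≤ R) :
    (ps.foldl (pvF L R) st).1.length = st.1.length ∧
    (ps.foldl (pvF L R) st).2.length = st.2.length ∧
    ((ps.foldl (pvF L R) st).1.getD i 0, (ps.foldl (pvF L R) st).2.getD i []) =
      ((ps.foldl (pvStepA (L + 1 + (i : Int))) (st.2.getD i [], st.1.getD i 0)).2,
       (ps.foldl (pvStepA (L + 1 + (i : Int))) (st.2.getD i [], st.1.getD i 0)).1) := by
  induction ps generalizing st with
  | nil => exact ⟨rfl, rfl, rfl⟩
  | cons q t ihp =>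
    have hq2 : 2 ≤ q := hps q (List.mem_cons_self ..)
    have hq2' : (2 : Int) ≤ (q : Int) := by exact_mod_cast hq2
    have hp0 : (0 : Int) < (q : Int) := by omega
    set n := L + 1 + (i : Int) with hn
    set a := L + 1 + (q : Int) - 1 with ha
    set qq := PySem.Int.floordiv a (q : Int) with hqq
    have hfl : qq * (q : Int) ≤ a ∧ a < (qq + 1) * (q : Int) :=
      (PySem.Int.floordiv_eq_iff_of_pos hp0).mp hqq.symm
    have hstart : L + 1 ≤ max ((q : Int) * (q : Int)) (qq * (q : Int)) := by
      have h1 : L < qq * (q : Int) := by nlinarith [hfl.2]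
      have := le_max_right ((q : Int) * (q : Int)) (qq * (q : Int))
      omega
    have hmem : ∀ j ∈ PySem.List.pyRange (max ((q : Int) * (q : Int)) (qq * (q : Int))) (R + 1)
        (q : Int), L + 1 ≤ j := by
      intro j hj
      have := (PySem.List.mem_pyRange_iff_of_pos hp0 j).mp hj
      omega
    have hnd := pv_nodup_pyRange_pos (max ((q : Int) * (q : Int)) (qq * (q : Int))) (R + 1)
      (q : Int) hp0
    have il := pv_innerLoop L (q : Int)
      (PySem.List.pyRange (max ((q : Int) * (q : Int)) (qq * (q : Int))) (R + 1) (q : Int))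
      hmem hnd st i hi1 hi2
    have hcond : (n ∈ PySem.List.pyRange (max ((q : Int) * (q : Int)) (qq * (q : Int))) (R + 1)
        (q : Int)) ↔ ((q : Int) ∣ n ∧ (q : Int) * (q : Int) ≤ n) :=
      pv_mem_range_iff L R (q : Int) n hq2' (by omega) hiR
    have hFq : pvF L R st q = (PySem.List.pyRange (max ((q : Int) * (q : Int)) (qq * (q : Int)))
        (R + 1) (q : Int)).foldl (pvInner L (q : Int)) st := by
      show (PySem.List.pyRange (max (((q : Nat) : Int) * ((q : Nat) : Int))
        (PySem.Int.floordiv (L + 1 + ((q : Nat) : Int) - 1) ((q : Nat) : Int) * ((q : Nat) : Int)))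
        (R + 1) ((q : Nat) : Int)).foldl (pvInner L ((q : Nat) : Int)) st = _
      rw [← ha, ← hqq]
    have ihp' := ihp (fun q' hq' => hps q' (List.mem_cons_of_mem _ hq')) (pvF L R st q)
      (by rw [hFq, il.1]; exact hi1) (by rw [hFq, il.2.1]; exact hi2)
    rw [List.foldl_cons, List.foldl_cons]
    refine ⟨by rw [ihp'.1, hFq, il.1], by rw [ihp'.2.1, hFq, il.2.1], ?_⟩
    have hentry : ((pvF L R st q).2.getD i [], (pvF L R st q).1.getD i 0) =
        pvStepA n (st.2.getD i [], st.1.getD i 0) q := by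
      rw [hFq]
      have h22 := il.2.2
      unfold pvStepA
      by_cases hc : (q : Int) ∣ n ∧ (q : Int) * (q : Int) ≤ n
      · rw [if_pos hc]
        rw [if_pos (hcond.mpr hc)] at h22
        have e1 := congrArg Prod.fst h22
        have e2 := congrArg Prod.snd h22
        simp only at e1 e2
        rw [e1, e2]
      · rw [if_neg hc]
        rw [if_neg (fun hmm => hc (hcond.mp hmm))] at h22
        have e1 := congrArg Prod.fst h22
        have e2 := congrArg Prod.snd h22
        simp only at e1 e2
        rw [e1, e2]
    rw [ihp'.2.2, hentry]

-- the leftover loop, pointwise at index i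
-- per-number top-level equality
def pvBfold (limit : Nat) (n : Int) : Int × List (Int × Int) :=
  (PySem.List.pyRange 2 ((limit : Int) + 1) 1).foldl
    (fun (s : Int × List (Int × Int)) d => pvTrialWhile d 0 s.1 s.2) (n, [])

def pvAfold (limit : Nat) (n : Int) : List Int × Int :=
  (pvSieve limit).foldl (pvStepA n) ([], n)

theorem pv_perNumber (limit : Nat) (hl : 1 ≤ limit) (n : Int) :
    (if 1 < n then
      (if 1 < (pvBfold limit n).1 then (pvBfold limit n).2 ++ [((pvBfold limit n).1, 1)]
       else (pvBfold limit n).2)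
     else []) =
    pvPairFrom [] ((pvAfold limit n).1 ++
      (if 1 < (pvAfold limit n).2 then [(pvAfold limit n).2] else [])) := by
  by_cases hn : 1 < n
  · rw [if_pos hn]
    unfold pvAfold pvBfold
    rw [pv_sieve_eq]
    have hr : PySem.List.pyRange 2 ((limit : Int) + 1) 1 =
        (List.range' 2 (limit - 1)).map (fun d : Nat => (d : Int)) := by
      rw [PySem.List.pyRange_one]
      have h1 : ((limit : Int) + 1 - 2).toNat = limit - 1 := by omega
      rw [h1, List.range'_eq_map_range, List.map_map]
      apply List.map_congr_left
      intro t _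
      simp only [Function.comp_apply]
      push_cast
      ring
    rw [hr]
    have hfun : (fun (s : Int × List (Int × Int)) d => pvTrialWhile d 0 s.1 s.2) = pvStepB := rfl
    rw [hfun]
    have hcore := pv_core n hn (limit - 1) 2 n [] [] (le_refl 2) (by omega) dvd_rfl (le_refl n)
      (fun q hq _ => hq.two_le) (by intro x hx; simp at hx) rfl
    by_cases hb : 1 < (((List.range' 2 (limit - 1)).map (fun d : Nat => (d : Int))).foldl
        pvStepB (n, [])).1
    · rw [if_pos hb]
      rw [if_pos hb] at hcore
      exact hcore
    · rw [if_neg hb]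
      rw [if_neg hb, List.append_nil] at hcore
      exact hcore
  · rw [if_neg hn]
    unfold pvAfold
    rw [pv_smallA n (by omega) _ []]
    rw [if_neg hn]
    simp [pvPairFrom]

-- ===== VERDICT (by name: the statement is the Claim_ definition above) =====
theorem segmented_factor_ordered_spec : Claim_equal_segmented_factor_ordered := by
  intro L R hdom hpre
  unfold Spec_segmented_factor_ordered
  unfold Pre_segmented_factor_ordered at hpre
  show segmented_factor_ordered L R = segmented_factor_ordered_alt L R
  simp only [segmented_factor_ordered, segmented_factor_ordered_alt]
  rw [PySem.List.foldl_append_singleton_eq_map, PySem.List.foldl_append_singleton_eq_map,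
    List.nil_append, List.nil_append]
  have hrng : PySem.List.pyRange (L + 1) (R + 1) 1 =
      (List.range (R - L).toNat).map (fun i : Nat => L + 1 + (i : Int)) := by
    rw [PySem.List.pyRange_one]
    have h1 : R + 1 - (L + 1) = R - L := by ring
    rw [h1]
  rw [hrng, List.map_map]
  apply List.map_congr_left
  intro i hi
  have hisz : i < (R - L).toNat := List.mem_range.mp hi
  have hiR : L + 1 + (i : Int) ≤ R := by omega
  simp only [Function.comp_apply, Prod.mk.injEq]
  refine ⟨trivial, ?_⟩
  -- A side: reduce the array pipeline at index i to the per-number folds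
  set limit : Nat := R.toNat.sqrt + 1 with hlim
  set n := L + 1 + (i : Int) with hn
  set numbers := (List.range (R - L).toNat).map (fun i : Nat => L + 1 + (i : Int)) with hnumbers
  set factors := List.replicate (R - L).toNat ([] : List Int) with hfactors
  have hlen1 : numbers.length = (R - L).toNat := by
    rw [hnumbers, List.length_map, List.length_range]
  have hlen2 : factors.length = (R - L).toNat := by
    rw [hfactors, List.length_replicate]
  have hps : ∀ q ∈ pvSieve limit, 2 ≤ q := by
    intro q hq
    rw [pv_sieve_eq] at hq
    have := (List.mem_filter.mp hq).1
    exact (List.mem_range'_1.mp this).1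
  have hFfun : (fun (st : List Int × List (List Int)) (q : Nat) =>
      (PySem.List.pyRange (max ((q : Int) * (q : Int))
        (PySem.Int.floordiv (L + 1 + (q : Int) - 1) (q : Int) * (q : Int))) (R + 1)
        (q : Int)).foldl (pvInner L (q : Int)) st) = pvF L R := rfl
  have pl := pv_primeLoop L R (pvSieve limit) hps (numbers, factors) i
    (by rw [hlen1]; exact hisz) (by rw [hlen2]; exact hisz) hiR
  have hnum_i : numbers.getD i 0 = n := by
    rw [hnumbers, PySem.List.getD_map_range _ _ _ _ hisz]
  have hfac_i : factors.getD i [] = [] := by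
    rw [hfactors, List.getD_replicate _ hisz]
  rw [hnum_i, hfac_i] at pl
  set SA := (pvSieve limit).foldl (pvF L R) (numbers, factors) with hSA
  have hr_eq : (pvSieve limit).foldl (pvStepA n) ([], n) = pvAfold limit n := rfl
  rw [hr_eq] at pl
  -- the leftover loop
  have hlol := pv_leftoverLoop (R - L).toNat SA.1 SA.2 i hisz
    (by rw [pl.2.1, hlen2]; exact hisz)
  -- assemble the A side
  have hAside : pvPair ((((List.range (R - L).toNat).foldl
      (fun fs i => if 1 < SA.1.getD i 0 then fs.set i ((fs.getD i []) ++ [SA.1.getD i 0]) else fs)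
      SA.2)).getD i []) =
      pvPairFrom [] ((pvAfold limit n).1 ++
        (if 1 < (pvAfold limit n).2 then [(pvAfold limit n).2] else [])) := by
    rw [hlol, pv_pvPair_eq]
    have e1 : SA.1.getD i 0 = (pvAfold limit n).2 := by
      have := congrArg Prod.fst pl.2.2
      simpa using this
    have e2 : SA.2.getD i [] = (pvAfold limit n).1 := by
      have := congrArg Prod.snd pl.2.2
      simpa using this
    rw [e1, e2]
    by_cases hb : 1 < (pvAfold limit n).2
    · rw [if_pos hb, if_pos hb]
    · rw [if_neg hb, if_neg hb, List.append_nil]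
  rw [hFfun, ← hSA, hAside]
  -- B side is pv_perNumber
  have hB := pv_perNumber limit (by omega) n
  have hBfold : (PySem.List.pyRange 2 ((limit : Int) + 1) 1).foldl
      (fun (s : Int × List (Int × Int)) d => pvTrialWhile d 0 s.1 s.2) (n, []) =
      pvBfold limit n := rfl
  rw [hBfold]
  by_cases hn1 : 1 < n
  · rw [if_pos hn1]
    rw [if_pos hn1] at hB
    exact hB.symm
  · rw [if_neg hn1]
    rw [if_neg hn1] at hB
    exact hB.symm
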